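-- pv_equiv track=rewrite | github.com/LEE-sh1673/Programmers-Algorithms | 프로그래머스/Lv.2/17683. ［3차］ 방금그곡/［3차］ 방금그곡.py | solution
-- ===== SOURCE A (Python) =====
-- def solution(m, musicinfos):
--     repeated_musics = []
--     m = encode_melody(m)
--
--     for info in musicinfos:
--         s_time, e_time, title, melody = info.split(',')
--         times = time_diff(s_time, e_time)
--         melody = repeat_melody(encode_melody(melody), times)
--         repeated_musics.append((title, times, melody))
--
--     matched_musics = [music for music in repeated_musics if m in music[-1]]
--
--     if not matched_musics:
--         return '(None)'
--
--     answer = matched_musics[0][0]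
--
--     if len(matched_musics) > 1:
--         answer = max(matched_musics, key=lambda music : music[1])[0]
--
--     return answer
--
-- def encode_melody(melody):
--     return melody\
--         .replace('A#', 'a')\
--         .replace('C#', 'c')\
--         .replace('D#', 'd')\
--         .replace('F#', 'f')\
--         .replace('G#', 'g')
--
-- def time_diff(start, end):
--     s_hours, s_minutes = map(int, start.split(':'))
--     e_hours, e_minutes = map(int, end.split(':'))
--     return (e_hours - s_hours) * 60 + (e_minutes - s_minutes)
--
-- def repeat_melody(melody, times):
--     a, b = divmod(times, len(melody))
--     return encode_melody(melody * a + melody[:b])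
-- ===== SOURCE B (Python) =====
-- def solution(m, musicinfos):
--     target = _encode(m)
--     best = None  # (duration, title) of the best match so far; strict > keeps the first of equal durations
--     for info in musicinfos:
--         start, end, title, melody = info.split(',')
--         dur = _minutes(end) - _minutes(start)
--         played = _encode(_cycle(_encode(melody), dur))
--         if target in played and (best is None or dur > best[0]):
--             best = (dur, title)
--     return best[1] if best else '(None)'
--
--
-- def _encode(melody):
--     # one left-to-right scan: a sharp note "X#" (X in ACDFG) becomes the lowercase letter
--     out = []
--     i = 0
--     while i < len(melody):
--         ch = melody[i]
--         if ch in 'ACDFG' and i + 1 < len(melody) and melody[i + 1] == '#':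
--             out.append(ch.lower())
--             i += 2
--         else:
--             out.append(ch)
--             i += 1
--     return ''.join(out)
--
--
-- def _minutes(t):
--     h, mm = map(int, t.split(':'))
--     return h * 60 + mm
--
--
-- def _cycle(s, n):
--     # the first n notes of s played on repeat
--     out = []
--     for i in range(n):
--         out.append(s[i % len(s)])
--     return ''.join(out)
-- ===== Notes on version B (the rewrite author's own statement) =====
-- stated objective: alternative
-- what changed: One streaming pass keeping the running best (duration, title) replaces A's build-all/filter/max(key) pipeline; the melody is encoded by a single left-to-right character scan instead of five chained str.replace passes, the duration is the difference of absolute minutes instead of per-field differences, and the repeated melody is built by cyclic indexing instead of string multiplication plus a divmod slice. …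
-- outside the precondition, e.g. on solution('A', ['12:05,12:00,T,AB']): A returns 'T', B returns '(None)'
import Mathlib
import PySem

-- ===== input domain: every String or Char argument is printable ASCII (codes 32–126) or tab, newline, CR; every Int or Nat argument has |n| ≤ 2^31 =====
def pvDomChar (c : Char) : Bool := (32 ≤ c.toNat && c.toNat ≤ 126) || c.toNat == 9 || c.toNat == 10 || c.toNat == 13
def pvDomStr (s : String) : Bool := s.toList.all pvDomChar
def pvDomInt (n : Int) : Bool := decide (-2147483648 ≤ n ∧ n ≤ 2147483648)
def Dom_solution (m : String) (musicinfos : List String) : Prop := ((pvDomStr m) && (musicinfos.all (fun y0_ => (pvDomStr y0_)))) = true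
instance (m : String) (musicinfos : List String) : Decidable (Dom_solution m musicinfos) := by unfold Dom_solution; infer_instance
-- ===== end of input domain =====

-- B replaces A's build-all / filter / max(key) pipeline by one streaming pass keeping the
-- running best (duration, title), encodes the melody by a single left-to-right scan instead
-- of five chained str.replace passes, and builds the repeated melody by cyclic indexing
-- instead of string multiplication plus a divmod slice; return values only, no mutation.

-- ===== PORT A =====
def encodeMelody (s : List Char) : List Char :=
  PySem.Chars.replace (PySem.Chars.replace (PySem.Chars.replace (PySem.Chars.replace
    (PySem.Chars.replace s ['A', '#'] ['a']) ['C', '#'] ['c']) ['D', '#'] ['d'])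
    ['F', '#'] ['f']) ['G', '#'] ['g']

def timeDiff (start stop : List Char) : Int :=
  match PySem.Chars.splitOn start [':'], PySem.Chars.splitOn stop [':'] with
  | [sh, sm], [eh, em] =>
    match PySem.Int.ofChars? sh, PySem.Int.ofChars? sm,
          PySem.Int.ofChars? eh, PySem.Int.ofChars? em with
    | some a, some b, some c, some d => (c - a) * 60 + (d - b)
    | _, _, _, _ => 0  -- unreachable under Pre_solution (Python: int() raises ValueError)
  | _, _ => 0          -- unreachable under Pre_solution (Python: unpacking raises ValueError)

def repeatMelody (mel : List Char) (times : Int) : List Char :=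
  -- a, b = divmod(times, len(melody)); len(melody) ≠ 0 under Pre_solution
  let a := PySem.Int.floordiv times (mel.length : Int)
  let b := PySem.Int.mod times (mel.length : Int)
  encodeMelody (PySem.List.pyRepeat mel a ++ PySem.List.slice mel none (some b))

def solution (m : String) (musicinfos : List String) : String :=
  let mEnc := encodeMelody m.toList
  let repeatedMusics := musicinfos.foldl (fun acc info =>
    acc ++ [match PySem.Chars.splitOn info.toList [','] with
      | [sTime, eTime, title, melody] =>
        let times := timeDiff sTime eTime
        (title, times, repeatMelody (encodeMelody melody) times)
      | _ => ([], 0, [])   -- unreachable under Pre_solution (Python: unpacking raises ValueError)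
      ]) []
  let matched := repeatedMusics.filter (fun music => PySem.Chars.isIn mEnc music.2.2)
  match matched with
  | [] => "(None)"
  | first :: _ =>
    let answer := first.1
    let answer := if 1 < matched.length then
        match PySem.List.max? matched (fun music => music.2.1) with
        | some best => best.1
        | none => answer   -- unreachable: matched is nonempty here
      else answer
    String.ofList answer

-- ===== PORT B =====
-- Source B's _encode: one left-to-right scan over the characters; "X#" (X ∈ ACDFG) → lowercase X.
-- (single-character `ch in 'ACDFG'` is exactly membership in those five characters)
def scanEnc : List Char → List Char
  | [] => []
  | [c] => [c]
  | c :: d :: rest =>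
    if (decide (c ∈ (['A', 'C', 'D', 'F', 'G'] : List Char)) && (d == '#')) then
      PySem.Chars.lower [c] ++ scanEnc rest
    else
      c :: scanEnc (d :: rest)

-- Source B's _minutes
def minutesOf (t : List Char) : Int :=
  match PySem.Chars.splitOn t [':'] with
  | [h, mm] =>
    match PySem.Int.ofChars? h, PySem.Int.ofChars? mm with
    | some a, some b => a * 60 + b
    | _, _ => 0        -- unreachable under Pre_solution (Python: int() raises ValueError)
  | _ => 0             -- unreachable under Pre_solution (Python: unpacking raises ValueError)

-- Source B's _cycle: the first n notes of s played on repeat; the pyGetD default is unreachable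
-- (0 ≤ i % len < len; len = 0 raises ZeroDivisionError in Python, excluded by Pre_solution)
def cycleChars (s : List Char) (n : Int) : List Char :=
  (PySem.List.pyRange 0 n 1).foldl
    (fun out i => out ++ [PySem.List.pyGetD s (PySem.Int.mod i (s.length : Int)) ' ']) []

def solution_alt (m : String) (musicinfos : List String) : String :=
  let target := scanEnc m.toList
  let best := musicinfos.foldl (fun best info =>
    match PySem.Chars.splitOn info.toList [','] with
    | [start, stop, title, melody] =>
      let dur := minutesOf stop - minutesOf start
      let played := scanEnc (cycleChars (scanEnc melody) dur)
      if (PySem.Chars.isIn target played &&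
          (match best with | none => true | some b => decide (b.1 < dur))) then
        some (dur, title)
      else best
    | _ => best          -- unreachable under Pre_solution (Python: unpacking raises ValueError)
    ) (none : Option (Int × List Char))
  match best with
  | some b => String.ofList b.2
  | none => "(None)"

-- ===== PRECONDITION & SPEC =====
-- parse "HH:MM" into its two ints (used only by Pre_solution)
def t2? (t : List Char) : Option (Int × Int) :=
  match PySem.Chars.splitOn t [':'] with
  | [h, mm] =>
    match PySem.Int.ofChars? h, PySem.Int.ofChars? mm with
    | some a, some b => some (a, b)
    | _, _ => none
  | _ => none

def infoOK (info : String) : Bool :=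
  match PySem.Chars.splitOn info.toList [','] with
  | [s, e, _, mel] =>
    match t2? s, t2? e with
    | some (a, b), some (c, d) => decide (0 ≤ (c - a) * 60 + (d - b)) && !mel.isEmpty
    | _, _ => false
  | _ => false

-- Pre_solution excludes (i) the inputs on which the Python raises — an info without exactly
-- 4 comma-fields or a time without 2 int-parsable colon-fields (ValueError), or an empty
-- melody field (ZeroDivisionError) — and (ii) infos whose end time precedes the start time,
-- where playing a song for a negative number of minutes is a corner nobody specifies and
-- A's value (the first times % len notes, an artefact of divmod on negatives) is accidental.
def Pre_solution (m : String) (musicinfos : List String) : Prop :=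
  ∀ info ∈ musicinfos, infoOK info = true

instance (m : String) (musicinfos : List String) : Decidable (Pre_solution m musicinfos) := by
  unfold Pre_solution; infer_instance

def pvWitness_solution : String × List String := ("ABC", ["12:00,12:04,WORLD,ABC"])

def Spec_solution (m : String) (musicinfos : List String) (out : String) : Prop := out = solution_alt m musicinfos
instance (m : String) (musicinfos : List String) (out : String) : Decidable (Spec_solution m musicinfos out) := by unfold Spec_solution; infer_instance

-- ===== CLAIM (what is proved, stated in full; the proofs are below) =====
def Claim_equal_solution : Prop := ∀ (m : String) (musicinfos : List String), Dom_solution m musicinfos → Pre_solution m musicinfos → Spec_solution m musicinfos (solution m musicinfos)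

-- ===== LEMMAS AND PROOFS =====

-- ---- characterising PySem.Chars.replace by a direct structural recursion ----
def repS (old new : List Char) : List Char → List Char
  | [] => []
  | c :: t =>
    if old.isPrefixOf (c :: t) then new ++ repS old new (t.drop (old.length - 1))
    else c :: repS old new t
termination_by l => l.length
decreasing_by
  · simp [List.length_drop]
  · simp

theorem go_eq_repS (old new : List Char) (hold : old ≠ []) :
    ∀ (fuel : Nat) (l acc : List Char), l.length ≤ fuel →
      PySem.Chars.replace.go old new fuel l acc = acc.reverse ++ repS old new l := by
  intro fuel
  induction fuel with
  | zero =>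
    intro l acc hl
    have : l = [] := List.eq_nil_of_length_eq_zero (Nat.le_zero.mp hl)
    subst this
    simp [PySem.Chars.replace.go, repS]
  | succ n ih =>
    intro l acc hl
    cases l with
    | nil => simp [PySem.Chars.replace.go, repS]
    | cons c t =>
      rw [PySem.Chars.replace.go]
      by_cases hp : old.isPrefixOf (c :: t) = true
      · rw [if_pos hp]
        obtain ⟨k0, old', rfl⟩ := List.exists_cons_of_ne_nil hold
        have hdrop : List.drop (k0 :: old').length (c :: t) = t.drop ((k0 :: old').length - 1) := by
          simp
        rw [hdrop, ih _ _ (by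
          have := List.length_drop (l := t) (i := (k0 :: old').length - 1)
          simp at hl ⊢; omega)]
        rw [repS]
        rw [if_pos hp]
        simp
      · rw [if_neg hp, ih t (c :: acc) (by simp at hl ⊢; omega)]
        rw [repS, if_neg hp]
        simp

theorem replace_eq_repS (old new l : List Char) (hold : old ≠ []) :
    PySem.Chars.replace l old new = repS old new l := by
  unfold PySem.Chars.replace
  rw [if_neg (by simp [hold])]
  simpa using go_eq_repS old new hold l.length l [] le_rfl

-- step lemmas for the two-character patterns [k, '#'] → [x]
theorem rep2_hit (k x : Char) (u : List Char) :
    repS [k, '#'] [x] (k :: '#' :: u) = x :: repS [k, '#'] [x] u := by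
  rw [repS, if_pos (by simp [List.isPrefixOf])]
  simp

theorem rep2_pass (k x c : Char) (w : List Char) (h : ¬ (k = c ∧ w.head? = some '#')) :
    repS [k, '#'] [x] (c :: w) = c :: repS [k, '#'] [x] w := by
  rw [repS, if_neg]
  intro hp
  apply h
  cases w with
  | nil => simp [List.isPrefixOf] at hp
  | cons d w' =>
    simp [List.isPrefixOf] at hp
    exact ⟨hp.1, by simp [← hp.2]⟩

theorem rep2_head (k x : Char) (hx : x ≠ '#') (l : List Char) (h : l.head? ≠ some '#') :
    (repS [k, '#'] [x] l).head? ≠ some '#' := by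
  cases l with
  | nil => simp [repS]
  | cons c t =>
    rw [repS]
    by_cases hp : ([k, '#'] : List Char).isPrefixOf (c :: t) = true
    · rw [if_pos hp]; simpa using hx
    · rw [if_neg hp]; simpa using h

-- the chained-replace encoder written through repS
def chainEnc (l : List Char) : List Char :=
  repS ['G', '#'] ['g'] (repS ['F', '#'] ['f'] (repS ['D', '#'] ['d']
    (repS ['C', '#'] ['c'] (repS ['A', '#'] ['a'] l))))

theorem encodeMelody_eq_chainEnc (l : List Char) : encodeMelody l = chainEnc l := by
  unfold encodeMelody chainEnc
  rw [replace_eq_repS _ _ _ (by decide), replace_eq_repS _ _ _ (by decide),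
      replace_eq_repS _ _ _ (by decide), replace_eq_repS _ _ _ (by decide),
      replace_eq_repS _ _ _ (by decide)]

theorem chainEnc_pass (c : Char) (t : List Char)
    (h : ¬ (c ∈ (['A', 'C', 'D', 'F', 'G'] : List Char) ∧ t.head? = some '#')) :
    chainEnc (c :: t) = c :: chainEnc t := by
  unfold chainEnc
  by_cases hd : t.head? = some '#'
  · have hc : ¬ c ∈ (['A', 'C', 'D', 'F', 'G'] : List Char) := fun hc' => h ⟨hc', hd⟩
    simp only [List.mem_cons, List.not_mem_nil, or_false, not_or] at hc
    obtain ⟨h1, h2, h3, h4, h5⟩ := hc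
    rw [rep2_pass 'A' 'a' c t (fun ⟨e, _⟩ => h1 e.symm),
        rep2_pass 'C' 'c' c _ (fun ⟨e, _⟩ => h2 e.symm),
        rep2_pass 'D' 'd' c _ (fun ⟨e, _⟩ => h3 e.symm),
        rep2_pass 'F' 'f' c _ (fun ⟨e, _⟩ => h4 e.symm),
        rep2_pass 'G' 'g' c _ (fun ⟨e, _⟩ => h5 e.symm)]
  · have g1 := rep2_head 'A' 'a' (by decide) t hd
    have g2 := rep2_head 'C' 'c' (by decide) _ g1
    have g3 := rep2_head 'D' 'd' (by decide) _ g2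
    have g4 := rep2_head 'F' 'f' (by decide) _ g3
    rw [rep2_pass 'A' 'a' c t (fun ⟨_, e⟩ => hd e),
        rep2_pass 'C' 'c' c _ (fun ⟨_, e⟩ => g1 e),
        rep2_pass 'D' 'd' c _ (fun ⟨_, e⟩ => g2 e),
        rep2_pass 'F' 'f' c _ (fun ⟨_, e⟩ => g3 e),
        rep2_pass 'G' 'g' c _ (fun ⟨_, e⟩ => g4 e)]

theorem chainEnc_hit (c : Char) (hc : c ∈ (['A', 'C', 'D', 'F', 'G'] : List Char))
    (u : List Char) :
    chainEnc (c :: '#' :: u) = PySem.Chars.lower [c] ++ chainEnc u := by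
  unfold chainEnc
  simp only [List.mem_cons, List.not_mem_nil, or_false] at hc
  rcases hc with rfl | rfl | rfl | rfl | rfl
  · rw [rep2_hit 'A' 'a' u,
        rep2_pass 'C' 'c' 'a' _ (fun ⟨e, _⟩ => absurd e (by decide)),
        rep2_pass 'D' 'd' 'a' _ (fun ⟨e, _⟩ => absurd e (by decide)),
        rep2_pass 'F' 'f' 'a' _ (fun ⟨e, _⟩ => absurd e (by decide)),
        rep2_pass 'G' 'g' 'a' _ (fun ⟨e, _⟩ => absurd e (by decide))]
    rfl
  · rw [rep2_pass 'A' 'a' 'C' _ (fun ⟨e, _⟩ => absurd e (by decide)),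
        rep2_pass 'A' 'a' '#' u (fun ⟨e, _⟩ => absurd e (by decide)),
        rep2_hit 'C' 'c' _,
        rep2_pass 'D' 'd' 'c' _ (fun ⟨e, _⟩ => absurd e (by decide)),
        rep2_pass 'F' 'f' 'c' _ (fun ⟨e, _⟩ => absurd e (by decide)),
        rep2_pass 'G' 'g' 'c' _ (fun ⟨e, _⟩ => absurd e (by decide))]
    rfl
  · rw [rep2_pass 'A' 'a' 'D' _ (fun ⟨e, _⟩ => absurd e (by decide)),
        rep2_pass 'A' 'a' '#' u (fun ⟨e, _⟩ => absurd e (by decide)),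
        rep2_pass 'C' 'c' 'D' _ (fun ⟨e, _⟩ => absurd e (by decide)),
        rep2_pass 'C' 'c' '#' _ (fun ⟨e, _⟩ => absurd e (by decide)),
        rep2_hit 'D' 'd' _,
        rep2_pass 'F' 'f' 'd' _ (fun ⟨e, _⟩ => absurd e (by decide)),
        rep2_pass 'G' 'g' 'd' _ (fun ⟨e, _⟩ => absurd e (by decide))]
    rfl
  · rw [rep2_pass 'A' 'a' 'F' _ (fun ⟨e, _⟩ => absurd e (by decide)),
        rep2_pass 'A' 'a' '#' u (fun ⟨e, _⟩ => absurd e (by decide)),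
        rep2_pass 'C' 'c' 'F' _ (fun ⟨e, _⟩ => absurd e (by decide)),
        rep2_pass 'C' 'c' '#' _ (fun ⟨e, _⟩ => absurd e (by decide)),
        rep2_pass 'D' 'd' 'F' _ (fun ⟨e, _⟩ => absurd e (by decide)),
        rep2_pass 'D' 'd' '#' _ (fun ⟨e, _⟩ => absurd e (by decide)),
        rep2_hit 'F' 'f' _,
        rep2_pass 'G' 'g' 'f' _ (fun ⟨e, _⟩ => absurd e (by decide))]
    rfl
  · rw [rep2_pass 'A' 'a' 'G' _ (fun ⟨e, _⟩ => absurd e (by decide)),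
        rep2_pass 'A' 'a' '#' u (fun ⟨e, _⟩ => absurd e (by decide)),
        rep2_pass 'C' 'c' 'G' _ (fun ⟨e, _⟩ => absurd e (by decide)),
        rep2_pass 'C' 'c' '#' _ (fun ⟨e, _⟩ => absurd e (by decide)),
        rep2_pass 'D' 'd' 'G' _ (fun ⟨e, _⟩ => absurd e (by decide)),
        rep2_pass 'D' 'd' '#' _ (fun ⟨e, _⟩ => absurd e (by decide)),
        rep2_pass 'F' 'f' 'G' _ (fun ⟨e, _⟩ => absurd e (by decide)),
        rep2_pass 'F' 'f' '#' _ (fun ⟨e, _⟩ => absurd e (by decide)),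
        rep2_hit 'G' 'g' _]
    rfl

theorem chainEnc_eq_scanEnc (l : List Char) : chainEnc l = scanEnc l := by
  induction l using scanEnc.induct with
  | case1 => simp [chainEnc, repS, scanEnc]
  | case2 c =>
    rw [chainEnc_pass c [] (by simp)]
    simp [chainEnc, repS, scanEnc]
  | case3 c d rest hcond ih =>
    simp only [Bool.and_eq_true, decide_eq_true_eq, beq_iff_eq] at hcond
    obtain ⟨hc, rfl⟩ := hcond
    rw [chainEnc_hit c hc rest, scanEnc, if_pos (by simp [hc]), ih]
  | case4 c d rest hcond ih =>
    simp only [Bool.and_eq_true, decide_eq_true_eq, beq_iff_eq] at hcond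
    rw [chainEnc_pass c (d :: rest) (by
      intro ⟨h1, h2⟩
      simp at h2
      exact hcond ⟨h1, h2⟩), scanEnc, if_neg (by simpa using hcond), ih]

theorem encodeMelody_eq_scanEnc (l : List Char) : encodeMelody l = scanEnc l := by
  rw [encodeMelody_eq_chainEnc, chainEnc_eq_scanEnc]

theorem scanEnc_ne_nil (l : List Char) (h : l ≠ []) : scanEnc l ≠ [] := by
  match l with
  | [] => exact absurd rfl h
  | [c] => simp [scanEnc]
  | c :: d :: r =>
    rw [scanEnc]
    split
    · simp [PySem.Chars.lower]
    · simp

-- ---- the cyclic-index construction equals string repetition + slice ----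
theorem map_getD_range_take (s : List Char) (N : Nat) (h : N ≤ s.length) :
    (List.range N).map (fun k => s.getD k ' ') = s.take N := by
  apply List.ext_getElem
  · simp [h]
  · intro i h1 h2
    simp only [List.getElem_map, List.getElem_range, List.getElem_take]
    rw [List.getD_eq_getElem]

theorem cycleNat (s : List Char) (hs : s ≠ []) (N : Nat) :
    (List.range N).map (fun k => s.getD (k % s.length) ' ')
      = (List.replicate (N / s.length) s).flatten ++ s.take (N % s.length) := by
  induction N using Nat.strong_induction_on with
  | _ N ih =>
    have hL : 0 < s.length := List.length_pos_of_ne_nil hs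
    by_cases hlt : N < s.length
    · rw [Nat.div_eq_of_lt hlt, Nat.mod_eq_of_lt hlt]
      have : (List.range N).map (fun k => s.getD (k % s.length) ' ')
          = (List.range N).map (fun k => s.getD k ' ') := by
        apply List.map_congr_left
        intro k hk
        rw [Nat.mod_eq_of_lt (lt_trans (List.mem_range.mp hk) hlt)]
      rw [this, map_getD_range_take s N hlt.le]
      simp
    · rw [not_lt] at hlt
      obtain ⟨M, rfl⟩ : ∃ M, N = s.length + M := ⟨N - s.length, by omega⟩
      rw [List.range_add, List.map_append, List.map_map]
      have e1 : (List.range s.length).map (fun k => s.getD (k % s.length) ' ') = s := by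
        have : (List.range s.length).map (fun k => s.getD (k % s.length) ' ')
            = (List.range s.length).map (fun k => s.getD k ' ') := by
          apply List.map_congr_left
          intro k hk
          rw [Nat.mod_eq_of_lt (List.mem_range.mp hk)]
        rw [this, map_getD_range_take s s.length le_rfl, List.take_length]
      have e2 : ((fun k => s.getD (k % s.length) ' ') ∘ (fun x => s.length + x))
          = fun k => s.getD (k % s.length) ' ' := by
        funext k
        simp [Nat.add_mod_left]
      rw [e1, e2, ih M (by omega)]
      have d1 : (s.length + M) / s.length = M / s.length + 1 := by
        rw [Nat.add_comm, Nat.add_div_right _ hL]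
      have d2 : (s.length + M) % s.length = M % s.length := Nat.add_mod_left _ _
      rw [d1, d2, List.replicate_succ, List.flatten_cons, List.append_assoc]

theorem cycleCharsAux (s : List Char) (n : Int) (hs : s ≠ []) (hn : 0 ≤ n) :
    (PySem.List.pyRange 0 n 1).foldl
      (fun out i => out ++ [PySem.List.pyGetD s (PySem.Int.mod i (s.length : Int)) ' ']) []
      = PySem.List.pyRepeat s (PySem.Int.floordiv n (s.length : Int))
        ++ PySem.List.slice s none (some (PySem.Int.mod n (s.length : Int))) := by
  obtain ⟨N, rfl⟩ : ∃ N : Nat, n = (N : Int) := ⟨n.toNat, (Int.toNat_of_nonneg hn).symm⟩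
  rw [PySem.List.foldl_append_singleton_eq_map, PySem.List.pyRange_one]
  simp only [Int.sub_zero, Int.toNat_natCast, List.map_map, List.nil_append]
  have e : ((fun i => PySem.List.pyGetD s (PySem.Int.mod i (s.length : Int)) ' ') ∘
      (fun k : Nat => (0 : Int) + (k : Int))) = fun k : Nat => s.getD (k % s.length) ' ' := by
    funext k
    simp only [Function.comp, Int.zero_add, PySem.Int.mod_natCast, PySem.List.pyGetD_natCast]
  rw [e, cycleNat s hs N, PySem.Int.floordiv_natCast, PySem.Int.mod_natCast,
      PySem.List.slice_to_natCast]
  rfl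

theorem cycleChars_eq (s : List Char) (n : Int) (hs : s ≠ []) (hn : 0 ≤ n) :
    cycleChars s n
      = PySem.List.pyRepeat s (PySem.Int.floordiv n (s.length : Int))
        ++ PySem.List.slice s none (some (PySem.Int.mod n (s.length : Int))) := by
  exact cycleCharsAux s n hs hn

-- ---- the streaming best-pass equals filter + max(key) ----
def rowA (info : String) : List Char × Int × List Char :=
  match PySem.Chars.splitOn info.toList [','] with
  | [sTime, eTime, title, melody] =>
    let times := timeDiff sTime eTime
    (title, times, repeatMelody (encodeMelody melody) times)
  | _ => ([], 0, [])

def bestStep (tgt : List Char) (best : Option (Int × List Char))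
    (p : List Char × Int × List Char) : Option (Int × List Char) :=
  if (PySem.Chars.isIn tgt p.2.2 &&
      (match best with | none => true | some b => decide (b.1 < p.2.1))) then
    some (p.2.1, p.1)
  else best

def maxStep (acc : Option (List Char × Int × List Char)) (x : List Char × Int × List Char) :
    Option (List Char × Int × List Char) :=
  match acc with
  | none => some x
  | some mq => if mq.2.1 < x.2.1 then some x else some mq

theorem minutesOf_eq (t : List Char) (a b : Int) (h : t2? t = some (a, b)) :
    minutesOf t = a * 60 + b := by
  unfold t2? at h
  unfold minutesOf
  rcases hsp : PySem.Chars.splitOn t [':'] with _ | ⟨hh, _ | ⟨mm, _ | ⟨x3, r3⟩⟩⟩ <;>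
    simp only [hsp] at h ⊢ <;> try (cases h)
  cases hA : PySem.Int.ofChars? hh <;> cases hB : PySem.Int.ofChars? mm <;>
    simp only [hA, hB] at h ⊢ <;> try (cases h)
  rfl

theorem timeDiff_eq (s e : List Char) (a b c d : Int)
    (hs : t2? s = some (a, b)) (he : t2? e = some (c, d)) :
    timeDiff s e = (c - a) * 60 + (d - b) := by
  unfold t2? at hs he
  unfold timeDiff
  rcases hsp : PySem.Chars.splitOn s [':'] with _ | ⟨h1, _ | ⟨m1, _ | ⟨x3, r3⟩⟩⟩ <;>
    simp only [hsp] at hs ⊢ <;> try (cases hs)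
  rcases hep : PySem.Chars.splitOn e [':'] with _ | ⟨h2, _ | ⟨m2, _ | ⟨y3, s3⟩⟩⟩ <;>
    simp only [hep] at he ⊢ <;> try (cases he)
  cases hA : PySem.Int.ofChars? h1 <;> cases hB : PySem.Int.ofChars? m1 <;>
    simp only [hA, hB] at hs ⊢ <;> try (cases hs)
  cases hC : PySem.Int.ofChars? h2 <;> cases hD : PySem.Int.ofChars? m2 <;>
    simp only [hC, hD] at he ⊢ <;> try (cases he)
  rfl

theorem body_eq_bestStep (tgt : List Char) (info : String) (hOK : infoOK info = true)
    (best : Option (Int × List Char)) :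
    (match PySem.Chars.splitOn info.toList [','] with
     | [start, stop, title, melody] =>
       let dur := minutesOf stop - minutesOf start
       let played := scanEnc (cycleChars (scanEnc melody) dur)
       if (PySem.Chars.isIn tgt played &&
           (match best with | none => true | some b => decide (b.1 < dur))) then
         some (dur, title)
       else best
     | _ => best) = bestStep tgt best (rowA info) := by
  unfold infoOK at hOK
  unfold rowA
  rcases hsp : PySem.Chars.splitOn info.toList [','] with
    _ | ⟨s, _ | ⟨e, _ | ⟨ttl, _ | ⟨mel, _ | ⟨x5, r5⟩⟩⟩⟩⟩ <;>
    simp only [hsp] at hOK ⊢ <;> try (cases hOK)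
  cases hts : t2? s with
  | none => rw [hts] at hOK; cases hOK
  | some ab =>
    cases hte : t2? e with
    | none => rw [hts, hte] at hOK; cases hOK
    | some cd =>
      obtain ⟨a, b⟩ := ab
      obtain ⟨c, d⟩ := cd
      rw [hts, hte] at hOK
      simp only [Bool.and_eq_true, decide_eq_true_eq, Bool.not_eq_eq_eq_not,
        Bool.not_true, List.isEmpty_eq_false_iff] at hOK
      obtain ⟨hnn, hmel⟩ := hOK
      have hdur : minutesOf e - minutesOf s = timeDiff s e := by
        rw [minutesOf_eq s a b hts, minutesOf_eq e c d hte, timeDiff_eq s e a b c d hts hte]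
        ring
      have htd : timeDiff s e = (c - a) * 60 + (d - b) := timeDiff_eq s e a b c d hts hte
      have hplayed : scanEnc (cycleChars (scanEnc mel) (minutesOf e - minutesOf s))
          = repeatMelody (encodeMelody mel) (timeDiff s e) := by
        rw [hdur, ← encodeMelody_eq_scanEnc, ← encodeMelody_eq_scanEnc]
        unfold repeatMelody
        rw [cycleChars_eq (encodeMelody mel) (timeDiff s e)
          (by rw [encodeMelody_eq_scanEnc]; exact scanEnc_ne_nil mel hmel)
          (by rw [htd]; exact hnn)]
      rw [hplayed, hdur]
      rfl

theorem key_lemma (tgt : List Char) (rows : List (List Char × Int × List Char))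
    (acc : Option (List Char × Int × List Char)) :
    rows.foldl (bestStep tgt) (acc.map (fun p => (p.2.1, p.1)))
      = ((rows.filter (fun music => PySem.Chars.isIn tgt music.2.2)).foldl maxStep acc).map
          (fun p => (p.2.1, p.1)) := by
  induction rows generalizing acc with
  | nil => rfl
  | cons r t ih =>
    simp only [List.foldl_cons, List.filter_cons]
    have hstep : bestStep tgt (acc.map (fun p => (p.2.1, p.1))) r
        = if PySem.Chars.isIn tgt r.2.2 then (maxStep acc r).map (fun p => (p.2.1, p.1))
          else acc.map (fun p => (p.2.1, p.1)) := by
      unfold bestStep maxStep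
      cases acc with
      | none => cases hin : PySem.Chars.isIn tgt r.2.2 <;> simp
      | some q =>
        cases hin : PySem.Chars.isIn tgt r.2.2
        · simp
        · by_cases hq : q.2.1 < r.2.1 <;> simp [hq]
    by_cases hin : PySem.Chars.isIn tgt r.2.2 = true
    · rw [hstep, if_pos hin, if_pos hin, List.foldl_cons, ih]
    · rw [hstep, if_neg hin, if_neg (by simpa using hin), ih]

theorem max?_eq_foldl_maxStep (xs : List (List Char × Int × List Char)) :
    PySem.List.max? xs (fun music => music.2.1) = xs.foldl maxStep none := by
  unfold PySem.List.max?
  congr 1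
  funext acc x
  cases acc <;> rfl

theorem ports_eq (m : String) (musicinfos : List String)
    (hpre : ∀ info ∈ musicinfos, infoOK info = true) :
    solution m musicinfos = solution_alt m musicinfos := by
  simp only [solution, solution_alt]
  rw [PySem.List.foldl_congr_mem musicinfos _
      (fun best info => bestStep (scanEnc m.toList) best (rowA info)) none
      (fun best info hmem => body_eq_bestStep (scanEnc m.toList) info (hpre info hmem) best)]
  rw [show (fun (acc : List (List Char × Int × List Char)) (info : String) =>
      acc ++ [match PySem.Chars.splitOn info.toList [','] with
        | [sTime, eTime, title, melody] =>
          let times := timeDiff sTime eTime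
          (title, times, repeatMelody (encodeMelody melody) times)
        | _ => (([] : List Char), (0 : Int), ([] : List Char))])
      = fun acc info => acc ++ [rowA info] from rfl]
  simp only [PySem.List.foldl_append_singleton_eq_map, List.nil_append,
    encodeMelody_eq_scanEnc]
  rw [show (none : Option (Int × List Char)) =
      (none : Option (List Char × Int × List Char)).map (fun p => (p.2.1, p.1)) from rfl,
    ← List.foldl_map (f := rowA) (g := bestStep (scanEnc m.toList)), key_lemma, ← max?_eq_foldl_maxStep]
  cases hm : (musicinfos.map rowA).filter
      (fun music => PySem.Chars.isIn (scanEnc m.toList) music.2.2) with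
  | nil => simp [PySem.List.max?]
  | cons first rest =>
    have hne : (musicinfos.map rowA).filter
        (fun music => PySem.Chars.isIn (scanEnc m.toList) music.2.2) ≠ [] := by
      rw [hm]; exact List.cons_ne_nil _ _
    obtain ⟨mx, hmx⟩ : ∃ mx, PySem.List.max? ((musicinfos.map rowA).filter
        (fun music => PySem.Chars.isIn (scanEnc m.toList) music.2.2))
        (fun music => music.2.1) = some mx := by
      cases hx : PySem.List.max? ((musicinfos.map rowA).filter
          (fun music => PySem.Chars.isIn (scanEnc m.toList) music.2.2))
          (fun music => music.2.1) with
      | none => exact absurd ((PySem.List.max?_eq_none_iff _ _).mp hx) hne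
      | some mx => exact ⟨mx, rfl⟩
    rw [hm] at hmx
    rw [hmx]
    simp only [Option.map_some]
    cases rest with
    | nil =>
      have hfx : mx = first := by
        simpa [PySem.List.max?] using hmx.symm
      simp [hfx]
    | cons r rs =>
      simp [List.length_cons]

-- ===== VERDICT (by name: the statement is the Claim_ definition above) =====
theorem solution_spec : Claim_equal_solution := by
  intro m musicinfos _ hpre
  unfold Spec_solution
  exact ports_eq m musicinfos hpre
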